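-- pv_equiv track=rewrite | github.com/belgradGoat/WebScrapper | WebScraper/simple_news_summarizer.py | rank_articles_by_relevance
-- ===== SOURCE A (Python) =====
-- def rank_articles_by_relevance(articles):
--     """Rank articles by relevance using keyword importance"""
--     # Keywords that indicate high importance
--     important_keywords = [
--         'president', 'minister', 'crisis', 'war', 'conflict', 'emergency', 'breaking',
--         'urgent', 'major', 'significant', 'critical', 'summit', 'agreement', 'treaty',
--         'sanctions', 'nuclear', 'missile', 'attack', 'invasion', 'peace', 'talks'
--     ]
--
--     scored_articles = []
--
--     for article in articles:
--         title = article.get('title', '').lower()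
--         description = article.get('description', '').lower()
--         combined_text = f"{title} {description}"
--
--         # Calculate relevance score
--         score = 0
--
--         # High importance keywords get more points
--         for keyword in important_keywords:
--             if keyword in combined_text:
--                 score += 3
--
--         # Recent keywords get bonus points
--         recent_indicators = ['today', 'breaking', 'just', 'now', 'latest', 'update']
--         for indicator in recent_indicators:
--             if indicator in combined_text:
--                 score += 2
--
--         # Length bonus (longer descriptions often mean more substantial articles)
--         if len(description) > 100:
--             score += 1
--
--         scored_articles.append((score, article))
--
--     # Sort by score (highest first) and return top 50
--     scored_articles.sort(key=lambda x: x[0], reverse=True)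
--     return [article for score, article in scored_articles[:50]]
-- ===== SOURCE B (Python) =====
-- IMPORTANT_KEYWORDS = [
--     'president', 'minister', 'crisis', 'war', 'conflict', 'emergency', 'breaking',
--     'urgent', 'major', 'significant', 'critical', 'summit', 'agreement', 'treaty',
--     'sanctions', 'nuclear', 'missile', 'attack', 'invasion', 'peace', 'talks'
-- ]
--
-- RECENT_INDICATORS = ['today', 'breaking', 'just', 'now', 'latest', 'update']
--
--
-- def _score(article):
--     title = article.get('title', '').lower()
--     description = article.get('description', '').lower()
--     text = f"{title} {description}"
--     return (3 * sum(k in text for k in IMPORTANT_KEYWORDS)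
--             + 2 * sum(k in text for k in RECENT_INDICATORS)
--             + (len(description) > 100))
--
--
-- def rank_articles_by_relevance(articles):
--     """Rank articles by relevance: bounded top-50 buffer instead of a full sort."""
--     top = []  # at most 50 (score, article) pairs, descending score, stable
--     for article in articles:
--         s = _score(article)
--         i = 0
--         while i < len(top) and top[i][0] >= s:
--             i += 1
--         top.insert(i, (s, article))
--         del top[50:]
--     return [a for _, a in top]
-- ===== Notes on version B (the rewrite author's own statement) =====
-- stated objective: alternative
-- what changed: B keeps a bounded 50-element stable-insertion buffer instead of building the full (score, article) list, sorting it with reverse=True and slicing, and computes each score by counting matching keywords once (3*count + 2*count + length bonus) instead of accumulating per keyword.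
import Mathlib
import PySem

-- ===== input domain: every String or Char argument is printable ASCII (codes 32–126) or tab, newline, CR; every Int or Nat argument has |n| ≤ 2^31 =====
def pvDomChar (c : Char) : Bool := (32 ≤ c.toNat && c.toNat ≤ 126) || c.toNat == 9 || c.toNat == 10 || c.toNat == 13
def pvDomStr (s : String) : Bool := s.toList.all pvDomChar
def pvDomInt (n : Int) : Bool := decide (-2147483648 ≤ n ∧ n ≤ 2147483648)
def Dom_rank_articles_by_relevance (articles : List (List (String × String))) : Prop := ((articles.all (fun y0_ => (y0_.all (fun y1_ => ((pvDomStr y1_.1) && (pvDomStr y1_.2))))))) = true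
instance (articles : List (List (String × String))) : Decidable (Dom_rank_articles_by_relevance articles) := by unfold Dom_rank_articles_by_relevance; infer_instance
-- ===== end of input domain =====

-- B replaces A's build-all/full-sort/slice with a bounded stable-insertion top-50 buffer,
-- and scores by counting matching keywords once (3·count + 2·count + length bonus); objective: alternative.

-- ===== PORT A =====
-- the two keyword lists A declares inside the function (shared literals)
def pvImportantKeywords : List String :=
  ["president", "minister", "crisis", "war", "conflict", "emergency", "breaking",
   "urgent", "major", "significant", "critical", "summit", "agreement", "treaty",
   "sanctions", "nuclear", "missile", "attack", "invasion", "peace", "talks"]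

def pvRecentIndicators : List String :=
  ["today", "breaking", "just", "now", "latest", "update"]

def rank_articles_by_relevance (articles : List (List (String × String))) : List (List (String × String)) :=
  let scored_articles := articles.foldl (fun acc article =>
    let title := PySem.Str.lower ((PySem.Dict.mk article).getD "title" "")
    let description := PySem.Str.lower ((PySem.Dict.mk article).getD "description" "")
    let combined_text := title ++ " " ++ description
    let score : Int := 0
    let score := pvImportantKeywords.foldl
      (fun s keyword => if PySem.Str.isIn keyword combined_text then s + 3 else s) score
    let score := pvRecentIndicators.foldl
      (fun s indicator => if PySem.Str.isIn indicator combined_text then s + 2 else s) score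
    let score := if 100 < PySem.Str.len description then score + 1 else score
    acc ++ [(score, article)]) []
  let sorted := PySem.List.sorted scored_articles (fun x => x.1) true
  (PySem.List.slice sorted none (some 50)).map (fun p => p.2)

-- ===== PORT B =====
-- B's _score helper: lowercase once, count matching keywords, weight the counts
def pvScore (article : List (String × String)) : Int :=
  let title := PySem.Str.lower ((PySem.Dict.mk article).getD "title" "")
  let description := PySem.Str.lower ((PySem.Dict.mk article).getD "description" "")
  let text := title ++ " " ++ description
  3 * (pvImportantKeywords.countP (fun k => PySem.Str.isIn k text) : Int)
    + 2 * (pvRecentIndicators.countP (fun k => PySem.Str.isIn k text) : Int)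
    + (if 100 < PySem.Str.len description then 1 else 0)

-- B's while/insert: scan past entries with score ≥ s, insert the new pair there
def pvInsertTop (x : Int × List (String × String)) :
    List (Int × List (String × String)) → List (Int × List (String × String))
  | [] => [x]
  | h :: t => if x.1 ≤ h.1 then h :: pvInsertTop x t else x :: h :: t

def rank_articles_by_relevance_alt (articles : List (List (String × String))) : List (List (String × String)) :=
  let top := articles.foldl (fun top article =>
    (pvInsertTop (pvScore article, article) top).take 50) []   -- insert, then `del top[50:]`
  top.map (fun p => p.2)

-- ===== PRECONDITION & SPEC =====
def Spec_rank_articles_by_relevance (articles : List (List (String × String))) (out : List (List (String × String))) : Prop := out = rank_articles_by_relevance_alt articles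
instance (articles : List (List (String × String))) (out : List (List (String × String))) : Decidable (Spec_rank_articles_by_relevance articles out) := by unfold Spec_rank_articles_by_relevance; infer_instance

-- ===== CLAIM (what is proved, stated in full; the proofs are below) =====
def Claim_equal_rank_articles_by_relevance : Prop := ∀ (articles : List (List (String × String))), Dom_rank_articles_by_relevance articles → Spec_rank_articles_by_relevance articles (rank_articles_by_relevance articles)

-- ===== LEMMAS AND PROOFS =====

-- a foldl that adds a constant c per matching element is c times the match count
theorem pv_foldl_if_add {α : Type} (p : α → Bool) (c : Int) (l : List α) (s : Int) :
    l.foldl (fun s x => if p x then s + c else s) s = s + c * (l.countP p : Int) := by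
  induction l generalizing s with
  | nil => simp
  | cons h t ih =>
    by_cases hp : p h
    · simp [List.foldl_cons, hp, ih]
      ring
    · simp [List.foldl_cons, hp, ih]

-- A's inline score equals B's _score
theorem pv_score_eq (article : List (String × String)) :
    (let title := PySem.Str.lower ((PySem.Dict.mk article).getD "title" "")
     let description := PySem.Str.lower ((PySem.Dict.mk article).getD "description" "")
     let combined_text := title ++ " " ++ description
     let score : Int := 0
     let score := pvImportantKeywords.foldl
       (fun s keyword => if PySem.Str.isIn keyword combined_text then s + 3 else s) score
     let score := pvRecentIndicators.foldl
       (fun s indicator => if PySem.Str.isIn indicator combined_text then s + 2 else s) score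
     if 100 < PySem.Str.len description then score + 1 else score) = pvScore article := by
  simp only [pvScore, pv_foldl_if_add]
  split <;> ring

-- B's hand-written insertion is PySem's insertBy for the reverse-sort order
theorem pv_insertTop_eq (x : Int × List (String × String))
    (l : List (Int × List (String × String))) :
    pvInsertTop x l =
      PySem.List.insertBy (fun a b => decide (b.1 < a.1)) x l := by
  induction l with
  | nil => rfl
  | cons h t ih =>
    simp only [pvInsertTop, PySem.List.insertBy]
    rcases lt_or_ge h.1 x.1 with hlt | hle
    · rw [if_neg (by omega), if_pos (by simpa using hlt)]
    · rw [if_pos hle, if_neg (by simpa using not_lt.mpr hle), ih]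

-- truncating before inserting does not change the first k elements
theorem pv_take_insert (before : (Int × List (String × String)) → (Int × List (String × String)) → Bool)
    (x : Int × List (String × String)) (k : Nat) (l : List (Int × List (String × String))) :
    (PySem.List.insertBy before x (l.take k)).take k =
      (PySem.List.insertBy before x l).take k := by
  induction l generalizing k with
  | nil => simp
  | cons h t ih =>
    cases k with
    | zero => simp
    | succ j =>
      simp only [List.take_succ_cons, PySem.List.insertBy]
      split
      · cases j with
        | zero => simp
        | succ m =>
          simp only [List.take_succ_cons, List.cons.injEq, true_and]
          rw [List.take_take]
          congr 1
          omega
      · simp [List.take_succ_cons, ih]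

-- the truncated insertion fold is the truncation of the full insertion fold
theorem pv_fold_take (before : (Int × List (String × String)) → (Int × List (String × String)) → Bool)
    (k : Nat) (xs : List (Int × List (String × String)))
    (acc : List (Int × List (String × String))) :
    xs.foldl (fun t p => (PySem.List.insertBy before p t).take k) (acc.take k) =
      (xs.foldl (fun t p => PySem.List.insertBy before p t) acc).take k := by
  induction xs generalizing acc with
  | nil => simp
  | cons h t ih =>
    simp only [List.foldl_cons]
    rw [pv_take_insert, ← ih]

-- ===== VERDICT (by name: the statement is the Claim_ definition above) =====
theorem rank_articles_by_relevance_spec : Claim_equal_rank_articles_by_relevance := by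
  intro articles _
  show rank_articles_by_relevance articles = rank_articles_by_relevance_alt articles
  unfold rank_articles_by_relevance rank_articles_by_relevance_alt
  simp only [pv_score_eq]
  have hstep : (fun (acc : List (Int × List (String × String))) article =>
      acc ++ [(pvScore article, article)]) =
      (fun acc article => acc ++ [((fun a => (pvScore a, a)) article)]) := rfl
  rw [hstep, PySem.List.foldl_append_singleton_eq_map, List.nil_append,
      PySem.List.sorted_rev_eq_foldl_insertBy,
      PySem.List.slice_to (b := 50) _ (by norm_num)]
  simp only [pv_insertTop_eq]
  have h50 : Int.toNat 50 = 50 := rfl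
  rw [h50]
  have := pv_fold_take (fun a b => decide (b.1 < a.1)) 50
      (articles.map (fun a => (pvScore a, a))) []
  simp only [List.take_nil] at this
  rw [← this, List.foldl_map]
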